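-- pv_equiv track=rewrite | github.com/bsattelb/Research | tropical.py | displayTropPoly
-- ===== SOURCE A (Python) =====
-- def displayTropPoly(coeffs):
--     s = ''
--     addPlus = False
--
--     for term in coeffs:
--         if addPlus:
--             s += ' \oplus '
--         else:
--             addPlus = True
--
--         doConstant = True
--         doX1 = True
--         doX2 = True
--         if term[2] == 0:
--             doConstant = False
--         if term[0] == 0:
--             doX1 = False
--         if term[1] == 0:
--             doX2 = False
--
--         s += '('
--
--         if doConstant:
--             s += '{term[2]}'.format(term=term)
--         if doConstant and (doX1 or doX2):
--             s += ' \odot '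
--         if doX1:
--             s += 'x_1^{{\odot {term[0]}}}'.format(term=term)
--         if doX1 and doX2:
--             s += ' \odot '
--         if doX2:
--             s+= 'x_2^{{\odot {term[1]}}}'.format(term=term)
--         if not doConstant and not doX1 and not doX2:
--             s += '0'
--
--         s += ')'
--     return s
-- ===== SOURCE B (Python) =====
-- _TEMPLATES = [
--     '(0)',
--     '(x_2^{{\odot {1}}})',
--     '(x_1^{{\odot {0}}})',
--     '(x_1^{{\odot {0}}} \odot x_2^{{\odot {1}}})',
--     '({2})',
--     '({2} \odot x_2^{{\odot {1}}})',
--     '({2} \odot x_1^{{\odot {0}}})',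
--     '({2} \odot x_1^{{\odot {0}}} \odot x_2^{{\odot {1}}})',
-- ]
--
--
-- def displayTropPoly(coeffs):
--     return ' \oplus '.join(
--         _TEMPLATES[4 * (c != 0) + 2 * (a != 0) + (b != 0)].format(a, b, c)
--         for (a, b, c) in coeffs)
-- ===== Notes on version B (the rewrite author's own statement) =====
-- stated objective: alternative
-- what changed: Replaces A's flag-driven incremental concatenation (addPlus flag plus six pairwise separator branches) by an 8-entry LaTeX template table indexed by the presence bitmask 4*(c!=0)+2*(a!=0)+(b!=0); each term is formatted by one table lookup and the results are joined with ' \oplus '.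
import Mathlib
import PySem

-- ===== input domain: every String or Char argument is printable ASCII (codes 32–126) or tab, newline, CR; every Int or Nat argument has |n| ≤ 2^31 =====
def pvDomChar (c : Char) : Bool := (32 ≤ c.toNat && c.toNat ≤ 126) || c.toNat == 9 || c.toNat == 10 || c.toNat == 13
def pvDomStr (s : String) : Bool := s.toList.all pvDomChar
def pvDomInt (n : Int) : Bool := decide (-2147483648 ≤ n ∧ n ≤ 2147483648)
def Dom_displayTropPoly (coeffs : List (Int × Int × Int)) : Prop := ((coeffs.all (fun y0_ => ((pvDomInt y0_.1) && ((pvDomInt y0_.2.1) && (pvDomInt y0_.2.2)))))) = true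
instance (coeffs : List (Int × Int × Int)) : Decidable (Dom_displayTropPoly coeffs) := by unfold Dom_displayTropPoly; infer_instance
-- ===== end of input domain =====

-- B replaces A's addPlus flag and pairwise separator branches by an 8-entry template
-- table indexed by the presence bitmask of the three factors (objective: alternative).

-- ===== PORT A =====
-- one iteration of A's for-loop: state is (s, addPlus)
def dtpStep (st : String × Bool) (term : Int × Int × Int) : String × Bool :=
  let s := st.1
  let s := if st.2 then s ++ " \\oplus " else s
  -- addPlus is True from here on
  let doConstant := true
  let doX1 := true
  let doX2 := true
  let doConstant := if term.2.2 = 0 then false else doConstant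
  let doX1 := if term.1 = 0 then false else doX1
  let doX2 := if term.2.1 = 0 then false else doX2
  let s := s ++ "("
  let s := if doConstant then s ++ PySem.Int.toStr term.2.2 else s
  let s := if doConstant && (doX1 || doX2) then s ++ " \\odot " else s
  let s := if doX1 then s ++ "x_1^{\\odot " ++ PySem.Int.toStr term.1 ++ "}" else s
  let s := if doX1 && doX2 then s ++ " \\odot " else s
  let s := if doX2 then s ++ "x_2^{\\odot " ++ PySem.Int.toStr term.2.1 ++ "}" else s
  let s := if !doConstant && !doX1 && !doX2 then s ++ "0" else s
  let s := s ++ ")"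
  (s, true)

def displayTropPoly (coeffs : List (Int × Int × Int)) : String :=
  (coeffs.foldl dtpStep ("", false)).1

-- ===== PORT B =====
-- the template table applied to (a, b, c): each Python template is a literal with
-- fixed {0}/{1}/{2} slots, ported as the corresponding concatenation (exact)
def dtpTemplate (mask : Nat) (a b c : Int) : String :=
  match mask with
  | 0 => "(0)"
  | 1 => "(x_2^{\\odot " ++ PySem.Int.toStr b ++ "})"
  | 2 => "(x_1^{\\odot " ++ PySem.Int.toStr a ++ "})"
  | 3 => "(x_1^{\\odot " ++ PySem.Int.toStr a ++ "} \\odot x_2^{\\odot " ++ PySem.Int.toStr b ++ "})"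
  | 4 => "(" ++ PySem.Int.toStr c ++ ")"
  | 5 => "(" ++ PySem.Int.toStr c ++ " \\odot x_2^{\\odot " ++ PySem.Int.toStr b ++ "})"
  | 6 => "(" ++ PySem.Int.toStr c ++ " \\odot x_1^{\\odot " ++ PySem.Int.toStr a ++ "})"
  | _ => "(" ++ PySem.Int.toStr c ++ " \\odot x_1^{\\odot " ++ PySem.Int.toStr a ++ "} \\odot x_2^{\\odot " ++ PySem.Int.toStr b ++ "})"

def dtpAltTerm (t : Int × Int × Int) : String :=
  dtpTemplate ((if t.2.2 ≠ 0 then 4 else 0) + (if t.1 ≠ 0 then 2 else 0) + (if t.2.1 ≠ 0 then 1 else 0)) t.1 t.2.1 t.2.2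

def displayTropPoly_alt (coeffs : List (Int × Int × Int)) : String :=
  PySem.Str.join " \\oplus " (coeffs.map dtpAltTerm)

-- ===== PRECONDITION & SPEC =====
def Spec_displayTropPoly (coeffs : List (Int × Int × Int)) (out : String) : Prop := out = displayTropPoly_alt coeffs
instance (coeffs : List (Int × Int × Int)) (out : String) : Decidable (Spec_displayTropPoly coeffs out) := by unfold Spec_displayTropPoly; infer_instance

-- ===== CLAIM (what is proved, stated in full; the proofs are below) =====
def Claim_equal_displayTropPoly : Prop := ∀ (coeffs : List (Int × Int × Int)), Dom_displayTropPoly coeffs → Spec_displayTropPoly coeffs (displayTropPoly coeffs)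

-- ===== LEMMAS AND PROOFS =====

-- the ' \oplus '-prefixed tail B's join produces after its first element
def dtpTail (ts : List (Int × Int × Int)) : String :=
  String.ofList (ts.flatMap (fun t => " \\oplus ".toList ++ (dtpAltTerm t).toList))

-- A's loop body equals: append separator (if flagged) then B's term string
theorem dtpStep_eq (st : String × Bool) (t : Int × Int × Int) :
    dtpStep st t = ((if st.2 then st.1 ++ " \\oplus " else st.1) ++ dtpAltTerm t, true) := by
  unfold dtpStep dtpAltTerm dtpTemplate
  by_cases h2 : t.2.2 = 0 <;> by_cases h0 : t.1 = 0 <;> by_cases h1 : t.2.1 = 0 <;>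
    simp only [h0, h1, h2, ne_eq, not_true_eq_false, not_false_eq_true,
      Bool.and_self, Bool.and_true, Bool.and_false, Bool.or_self,
      Bool.or_true, Bool.or_false, Bool.not_true, Bool.not_false, if_neg, if_pos] <;>
    · refine Prod.ext ?_ rfl
      apply String.toList_inj.mp
      simp [String.toList_append]

theorem dtpLoop (ts : List (Int × Int × Int)) (s : String) :
    (ts.foldl dtpStep (s, true)).1 = s ++ dtpTail ts := by
  induction ts generalizing s with
  | nil => simp [dtpTail]
  | cons t ts ih =>
      simp only [List.foldl_cons, dtpStep_eq, if_true, ih, dtpTail, List.flatMap_cons]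
      apply String.toList_inj.mp
      simp [String.toList_append]

theorem dtpJoin_cons (t : Int × Int × Int) (ts : List (Int × Int × Int)) :
    PySem.Str.join " \\oplus " ((t :: ts).map dtpAltTerm) = dtpAltTerm t ++ dtpTail ts := by
  induction ts generalizing t with
  | nil =>
      apply String.toList_inj.mp
      simp [PySem.Str.join, PySem.Chars.join, List.intercalate, dtpTail]
  | cons u us ih =>
      apply String.toList_inj.mp
      have h := congrArg String.toList (ih u)
      simp [PySem.Str.join, PySem.Chars.join, List.intercalate, dtpTail,
        String.toList_append] at h ⊢
      simp [h]

-- ===== VERDICT (by name: the statement is the Claim_ definition above) =====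
theorem displayTropPoly_spec : Claim_equal_displayTropPoly := by
  intro coeffs _
  unfold Spec_displayTropPoly displayTropPoly displayTropPoly_alt
  cases coeffs with
  | nil => rfl
  | cons t ts =>
      rw [List.foldl_cons, dtpStep_eq, dtpJoin_cons]
      simp [dtpLoop]
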